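-- pv_equiv track=rewrite | github.com/talkad/OMPify | CompCoder/eval/metrics.py | compare_vars_autoPar
-- ===== SOURCE A (Python) =====
-- def compare_vars_autoPar(preds, labels):
--     result = {'TP': 0, 'FP': 0, 'TN': 0, 'FN': 0}
--
--     for pred, label in zip(preds, labels):
--         pred_vars = pred.split()[1:]
--         label_vars = label.split()[1:]
--
--         total_vars = set(pred_vars + label_vars)
--
--         for var in total_vars:
--             if var in pred_vars and var in label_vars:
--                 result['TP'] += 1
--             elif var not in pred_vars and var not in label_vars:
--                 result['TN'] += 1
--             elif var not in pred_vars and var in label_vars: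
--                 result['FN'] += 1
--             elif var in pred_vars and var not in label_vars:
--                 result['FP'] += 1
--
--     return result
-- ===== SOURCE B (Python) =====
-- def compare_vars_autoPar(preds, labels):
--     tp = fp = fn = 0
--     for pred, label in zip(preds, labels):
--         ps = set(pred.split()[1:])
--         ls = set(label.split()[1:])
--         tp += len(ps & ls)
--         fp += len(ps - ls)
--         fn += len(ls - ps)
--     return {'TP': tp, 'FP': fp, 'TN': 0, 'FN': fn}
-- ===== Notes on version B (the rewrite author's own statement) =====
-- stated objective: simpler
-- what changed: Replaced the inner per-variable loop with its 4-way if/elif ladder by three aggregate set-cardinality computations (|ps&ls|, |ps-ls|, |ls-ps|) per pair, with TN fixed at 0 since A's TN branch is unreachable.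
import Mathlib
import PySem

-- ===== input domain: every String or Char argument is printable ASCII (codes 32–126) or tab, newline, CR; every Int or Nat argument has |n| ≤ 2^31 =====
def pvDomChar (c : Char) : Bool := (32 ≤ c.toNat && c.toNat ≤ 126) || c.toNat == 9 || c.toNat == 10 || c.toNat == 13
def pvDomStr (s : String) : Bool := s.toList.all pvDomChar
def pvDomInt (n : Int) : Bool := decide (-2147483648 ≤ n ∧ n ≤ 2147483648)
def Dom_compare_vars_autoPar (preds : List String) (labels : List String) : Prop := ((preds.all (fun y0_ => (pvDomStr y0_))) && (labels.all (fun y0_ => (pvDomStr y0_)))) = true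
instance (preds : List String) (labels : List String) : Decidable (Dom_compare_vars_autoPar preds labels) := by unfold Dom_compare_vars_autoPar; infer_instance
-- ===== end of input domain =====

-- B replaces A's inner per-variable loop and 4-way if/elif ladder by three aggregate
-- set-cardinality computations per pair (TN stays 0: A's TN branch is unreachable); objective: simpler.


-- ===== PORT A =====
-- the 4-way if/elif ladder of A's inner loop
def pvLadderA (pred_vars label_vars : List String) (result : PySem.Dict String Int) (var : String) : PySem.Dict String Int :=
  if pred_vars.contains var && label_vars.contains var then result.modify "TP" 0 (· + 1)
  else if !pred_vars.contains var && !label_vars.contains var then result.modify "TN" 0 (· + 1)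
  else if !pred_vars.contains var && label_vars.contains var then result.modify "FN" 0 (· + 1)
  else if pred_vars.contains var && !label_vars.contains var then result.modify "FP" 0 (· + 1)
  else result

def compare_vars_autoPar (preds : List String) (labels : List String) : List (String × Int) :=
  let result0 : PySem.Dict String Int := PySem.Dict.ofList [("TP", 0), ("FP", 0), ("TN", 0), ("FN", 0)]
  let final := (preds.zip labels).foldl (fun result pl =>
    let pred_vars := (PySem.Str.split₀ pl.1).drop 1
    let label_vars := (PySem.Str.split₀ pl.2).drop 1
    let total_vars : PySem.Set String := PySem.Set.ofList (pred_vars ++ label_vars)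
    total_vars.foldl (pvLadderA pred_vars label_vars) result) result0
  final.items

-- ===== PORT B =====
def compare_vars_autoPar_alt (preds : List String) (labels : List String) : List (String × Int) :=
  let acc := (preds.zip labels).foldl (fun (acc : Int × Int × Int) pl =>
    let ps : PySem.Set String := PySem.Set.ofList ((PySem.Str.split₀ pl.1).drop 1)
    let ls : PySem.Set String := PySem.Set.ofList ((PySem.Str.split₀ pl.2).drop 1)
    (acc.1 + PySem.Set.len (PySem.Set.inter ps ls),
     acc.2.1 + PySem.Set.len (PySem.Set.diff ps ls),
     acc.2.2 + PySem.Set.len (PySem.Set.diff ls ps))) (0, 0, 0)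
  [("TP", acc.1), ("FP", acc.2.1), ("TN", 0), ("FN", acc.2.2)]

-- ===== PRECONDITION & SPEC =====
def Spec_compare_vars_autoPar (preds : List String) (labels : List String) (out : List (String × Int)) : Prop := out = compare_vars_autoPar_alt preds labels
instance (preds : List String) (labels : List String) (out : List (String × Int)) : Decidable (Spec_compare_vars_autoPar preds labels out) := by unfold Spec_compare_vars_autoPar; infer_instance

-- ===== CLAIM (what is proved, stated in full; the proofs are below) =====
def Claim_equal_compare_vars_autoPar : Prop := ∀ (preds : List String) (labels : List String), Dom_compare_vars_autoPar preds labels → Spec_compare_vars_autoPar preds labels (compare_vars_autoPar preds labels)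

-- ===== LEMMAS AND PROOFS =====

theorem pvModTP (a b c e : Int) : (PySem.Dict.mk [("TP",a),("FP",b),("TN",c),("FN",e)]).modify "TP" 0 (· + 1) = PySem.Dict.mk [("TP",a+1),("FP",b),("TN",c),("FN",e)] := by
  simp [PySem.Dict.modify, PySem.Dict.insert, PySem.Dict.getD, PySem.Dict.get?, PySem.Dict.contains]

theorem pvModFP (a b c e : Int) : (PySem.Dict.mk [("TP",a),("FP",b),("TN",c),("FN",e)]).modify "FP" 0 (· + 1) = PySem.Dict.mk [("TP",a),("FP",b+1),("TN",c),("FN",e)] := by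
  simp [PySem.Dict.modify, PySem.Dict.insert, PySem.Dict.getD, PySem.Dict.get?, PySem.Dict.contains]

theorem pvModFN (a b c e : Int) : (PySem.Dict.mk [("TP",a),("FP",b),("TN",c),("FN",e)]).modify "FN" 0 (· + 1) = PySem.Dict.mk [("TP",a),("FP",b),("TN",c),("FN",e+1)] := by
  simp [PySem.Dict.modify, PySem.Dict.insert, PySem.Dict.getD, PySem.Dict.get?, PySem.Dict.contains]

theorem pvInner (pv lv : List String) (S : List String) (h : ∀ x ∈ S, x ∈ pv ∨ x ∈ lv) (a b c e : Int) :
    S.foldl (pvLadderA pv lv) (PySem.Dict.mk [("TP",a),("FP",b),("TN",c),("FN",e)]) =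
    PySem.Dict.mk [("TP", a + S.countP (fun x => pv.contains x && lv.contains x)),
                   ("FP", b + S.countP (fun x => pv.contains x && !lv.contains x)),
                   ("TN", c),
                   ("FN", e + S.countP (fun x => !pv.contains x && lv.contains x))] := by
  induction S generalizing a b e with
  | nil => simp
  | cons x S ih =>
    have hx := h x (by simp)
    have h' : ∀ y ∈ S, y ∈ pv ∨ y ∈ lv := fun y hy => h y (by simp [hy])
    have hcp : pv.contains x = decide (x ∈ pv) := by
      by_cases hp : x ∈ pv <;> simp [hp]
    have hcl : lv.contains x = decide (x ∈ lv) := by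
      by_cases hl : x ∈ lv <;> simp [hl]
    rcases Classical.em (x ∈ pv) with hp | hp <;> rcases Classical.em (x ∈ lv) with hl | hl
    · simp only [List.foldl_cons, pvLadderA, hcp, hcl, hp, hl, decide_true, Bool.and_self,
        if_true, pvModTP, ih h', List.countP_cons]
      refine congrArg PySem.Dict.mk ?_
      simp
      omega
    · simp only [List.foldl_cons, pvLadderA, hcp, hcl, hp, hl, decide_true, decide_false,
        Bool.and_false, Bool.and_true, Bool.not_true, Bool.not_false, if_true, if_false, Bool.false_eq_true, pvModFP, ih h', List.countP_cons]
      refine congrArg PySem.Dict.mk ?_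
      simp
      omega
    · simp only [List.foldl_cons, pvLadderA, hcp, hcl, hp, hl, decide_true, decide_false,
        Bool.and_false, Bool.and_true, Bool.not_true, Bool.not_false, if_true, if_false, Bool.false_eq_true, pvModFN, ih h', List.countP_cons]
      refine congrArg PySem.Dict.mk ?_
      simp
      omega
    · exact absurd hx (by simp [hp, hl])

theorem pvCountLen (S T : List String) (p : String → Bool) (hS : S.Nodup) (hT : T.Nodup)
    (hmem : ∀ x, x ∈ T ↔ x ∈ S ∧ p x = true) : S.countP p = T.length := by
  have hperm : List.Perm (S.filter p) T := by
    rw [List.perm_ext_iff_of_nodup (hS.filter p) hT]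
    intro x; simp [List.mem_filter, hmem]
  rw [List.countP_eq_length_filter, hperm.length_eq]

def pvTPc (pl : String × String) : Int :=
  PySem.Set.len (PySem.Set.inter (PySem.Set.ofList ((PySem.Str.split₀ pl.1).drop 1)) (PySem.Set.ofList ((PySem.Str.split₀ pl.2).drop 1)))
def pvFPc (pl : String × String) : Int :=
  PySem.Set.len (PySem.Set.diff (PySem.Set.ofList ((PySem.Str.split₀ pl.1).drop 1)) (PySem.Set.ofList ((PySem.Str.split₀ pl.2).drop 1)))
def pvFNc (pl : String × String) : Int :=
  PySem.Set.len (PySem.Set.diff (PySem.Set.ofList ((PySem.Str.split₀ pl.2).drop 1)) (PySem.Set.ofList ((PySem.Str.split₀ pl.1).drop 1)))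

theorem pvPair (pv lv : List String) (a b c e : Int) :
    (PySem.Set.ofList (pv ++ lv)).foldl (pvLadderA pv lv)
      (PySem.Dict.mk [("TP",a),("FP",b),("TN",c),("FN",e)]) =
    PySem.Dict.mk [("TP", a + ((PySem.Set.inter (PySem.Set.ofList pv) (PySem.Set.ofList lv)).length : Int)),
                   ("FP", b + ((PySem.Set.diff (PySem.Set.ofList pv) (PySem.Set.ofList lv)).length : Int)),
                   ("TN", c),
                   ("FN", e + ((PySem.Set.diff (PySem.Set.ofList lv) (PySem.Set.ofList pv)).length : Int))] := by
  rw [pvInner pv lv _ (fun x hx => by simpa [PySem.Set.mem_ofList] using hx) a b c e]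
  have hS := PySem.Set.nodup_ofList (xs := pv ++ lv)
  have hTP : (PySem.Set.ofList (pv ++ lv)).countP (fun x => pv.contains x && lv.contains x)
      = (PySem.Set.inter (PySem.Set.ofList pv) (PySem.Set.ofList lv)).length := by
    refine pvCountLen _ _ _ hS (PySem.Set.nodup_inter _ _ (PySem.Set.nodup_ofList _)) ?_
    intro x
    simp [PySem.Set.mem_inter, PySem.Set.mem_ofList]
    tauto
  have hFP : (PySem.Set.ofList (pv ++ lv)).countP (fun x => pv.contains x && !lv.contains x)
      = (PySem.Set.diff (PySem.Set.ofList pv) (PySem.Set.ofList lv)).length := by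
    refine pvCountLen _ _ _ hS (PySem.Set.nodup_diff _ _ (PySem.Set.nodup_ofList _)) ?_
    intro x
    simp [PySem.Set.mem_diff, PySem.Set.mem_ofList]
    tauto
  have hFN : (PySem.Set.ofList (pv ++ lv)).countP (fun x => !pv.contains x && lv.contains x)
      = (PySem.Set.diff (PySem.Set.ofList lv) (PySem.Set.ofList pv)).length := by
    refine pvCountLen _ _ _ hS (PySem.Set.nodup_diff _ _ (PySem.Set.nodup_ofList _)) ?_
    intro x
    simp [PySem.Set.mem_diff, PySem.Set.mem_ofList]
    tauto
  rw [hTP, hFP, hFN]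

theorem pvOuterA (L : List (String × String)) (a b c e : Int) :
    L.foldl (fun result pl =>
        (PySem.Set.ofList ((PySem.Str.split₀ pl.1).drop 1 ++ (PySem.Str.split₀ pl.2).drop 1)).foldl
          (pvLadderA ((PySem.Str.split₀ pl.1).drop 1) ((PySem.Str.split₀ pl.2).drop 1)) result)
      (PySem.Dict.mk [("TP",a),("FP",b),("TN",c),("FN",e)]) =
    PySem.Dict.mk [("TP", a + (L.map pvTPc).sum), ("FP", b + (L.map pvFPc).sum), ("TN", c), ("FN", e + (L.map pvFNc).sum)] := by
  induction L generalizing a b e with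
  | nil => simp
  | cons pl L ih =>
    simp only [List.foldl_cons, pvPair, ih, List.map_cons, List.sum_cons]
    refine congrArg PySem.Dict.mk ?_
    simp only [pvTPc, pvFPc, pvFNc, PySem.Set.len]
    simp [add_assoc]

theorem pvOuterB (L : List (String × String)) (t f n : Int) :
    L.foldl (fun (acc : Int × Int × Int) pl => (acc.1 + pvTPc pl, acc.2.1 + pvFPc pl, acc.2.2 + pvFNc pl)) (t, f, n) =
    (t + (L.map pvTPc).sum, f + (L.map pvFPc).sum, n + (L.map pvFNc).sum) := by
  induction L generalizing t f n with
  | nil => simp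
  | cons pl L ih => simp [ih, add_assoc]


-- ===== VERDICT (by name: the statement is the Claim_ definition above) =====
theorem compare_vars_autoPar_spec : Claim_equal_compare_vars_autoPar := by
  intro preds labels _
  show compare_vars_autoPar preds labels = compare_vars_autoPar_alt preds labels
  have ha : compare_vars_autoPar preds labels =
      (PySem.Dict.mk [("TP", 0 + ((preds.zip labels).map pvTPc).sum),
        ("FP", 0 + ((preds.zip labels).map pvFPc).sum), ("TN", 0),
        ("FN", 0 + ((preds.zip labels).map pvFNc).sum)]).items :=
    congrArg PySem.Dict.items (pvOuterA (preds.zip labels) 0 0 0 0)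
  have hb : compare_vars_autoPar_alt preds labels =
      [("TP", 0 + ((preds.zip labels).map pvTPc).sum), ("FP", 0 + ((preds.zip labels).map pvFPc).sum),
       ("TN", 0), ("FN", 0 + ((preds.zip labels).map pvFNc).sum)] :=
    congrArg (fun acc : Int × Int × Int => [("TP", acc.1), ("FP", acc.2.1), ("TN", (0:Int)), ("FN", acc.2.2)])
      (pvOuterB (preds.zip labels) 0 0 0)
  rw [ha, hb]
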